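-- pv_equiv track=rewrite | github.com/intzy/ProjectEuler | src/pb265.py | string_builder_helper
-- ===== SOURCE A (Python) =====
-- def string_builder_helper(bin_str, blocks):
--     if not blocks:
--         return [bin_str]
--
--     add_blocks = []
--     if "11111" in blocks and bin_str[-1] == "0":
--         add_blocks.append("11111")
--     if "111" in blocks and bin_str[-1] == "0":
--         add_blocks.append("111")
--     if "000" in blocks and bin_str[-1] == "1":
--         add_blocks.append("000")
--     if "1" in blocks and not (bin_str[-1] == "1" and bin_str[-2] == "1"):
--         add_blocks.append("1")
--     if "0" in blocks and not (bin_str[-1] == "0" and bin_str[-2] == "0"):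
--         add_blocks.append("0")
--
--     strings = []
--     for x in add_blocks:
--         i = blocks.index(x)
--         strings += string_builder_helper(bin_str + x, blocks[:i] + blocks[i + 1 :])
--
--     return strings
-- ===== SOURCE B (Python) =====
-- def string_builder_helper(bin_str, blocks):
--     # Iterative DFS with an explicit stack instead of recursion; children are
--     # pushed in reverse so popping reproduces the recursion's preorder exactly.
--     results = []
--     stack = [(bin_str, blocks)]
--     while stack:
--         s, bs = stack.pop()
--         if not bs:
--             results.append(s)
--             continue
--         add_blocks = []
--         if "11111" in bs and s[-1] == "0":
--             add_blocks.append("11111")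
--         if "111" in bs and s[-1] == "0":
--             add_blocks.append("111")
--         if "000" in bs and s[-1] == "1":
--             add_blocks.append("000")
--         if "1" in bs and not (s[-1] == "1" and s[-2] == "1"):
--             add_blocks.append("1")
--         if "0" in bs and not (s[-1] == "0" and s[-2] == "0"):
--             add_blocks.append("0")
--         for x in reversed(add_blocks):
--             i = bs.index(x)
--             stack.append((s + x, bs[:i] + bs[i + 1:]))
--     return results
-- ===== Notes on version B (the rewrite author's own statement) =====
-- stated objective: alternative
-- what changed: Replaces the recursive enumeration by an iterative depth-first search over an explicit stack of (string, remaining-blocks) states, pushing children in reverse so the pop order reproduces the recursion's preorder leaf sequence.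
import Mathlib
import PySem

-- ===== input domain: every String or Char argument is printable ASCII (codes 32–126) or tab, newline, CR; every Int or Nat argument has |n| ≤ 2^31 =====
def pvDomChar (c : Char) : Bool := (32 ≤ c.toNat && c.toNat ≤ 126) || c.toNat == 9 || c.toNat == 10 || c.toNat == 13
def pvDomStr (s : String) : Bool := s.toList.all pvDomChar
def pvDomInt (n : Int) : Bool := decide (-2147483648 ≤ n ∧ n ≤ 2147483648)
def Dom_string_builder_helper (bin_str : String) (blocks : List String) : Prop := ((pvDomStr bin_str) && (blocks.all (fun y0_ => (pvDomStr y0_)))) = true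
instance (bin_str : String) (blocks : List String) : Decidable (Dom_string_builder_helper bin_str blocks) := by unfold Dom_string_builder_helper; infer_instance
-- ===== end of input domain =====

-- B replaces A's recursion by an iterative DFS over an explicit stack (children pushed in
-- reverse so pop order equals the recursion's preorder); same return value on Pre_.
-- Both ports carry a Nat fuel as a pure totality guard (provably sufficient at the entry
-- points; it never changes the computed value).

-- ===== PORT A =====
-- A's add_blocks (five appends guarded by membership and the last one/two characters;
-- bin_str[-1]/bin_str[-2] via PySem.Str.pyGet?, which is none exactly where Python raises)
def sbhAddBlocksA (s : String) (bs : List String) : List String :=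
  (if "11111" ∈ bs ∧ PySem.Str.pyGet? s (-1) = some '0' then ["11111"] else []) ++
  (if "111" ∈ bs ∧ PySem.Str.pyGet? s (-1) = some '0' then ["111"] else []) ++
  (if "000" ∈ bs ∧ PySem.Str.pyGet? s (-1) = some '1' then ["000"] else []) ++
  (if "1" ∈ bs ∧ ¬(PySem.Str.pyGet? s (-1) = some '1' ∧ PySem.Str.pyGet? s (-2) = some '1') then ["1"] else []) ++
  (if "0" ∈ bs ∧ ¬(PySem.Str.pyGet? s (-1) = some '0' ∧ PySem.Str.pyGet? s (-2) = some '0') then ["0"] else [])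

-- A's recursion; each level removes one block, so fuel = blocks.length + 1 suffices
-- (the fuel-0 branch is unreachable at the entry point below)
def sbhGoA : Nat → String → List String → List String
  | 0, _, _ => []
  | fuel + 1, bin_str, blocks =>
    if blocks = [] then [bin_str]
    else
      -- A's 'for x in add_blocks: strings += …' loop with its accumulator
      (sbhAddBlocksA bin_str blocks).foldl
        (fun strings x =>
          match PySem.List.index? blocks x with
          | some i =>
              strings ++ sbhGoA fuel (bin_str ++ x) (blocks.take i ++ blocks.drop (i + 1))
          | none => strings)  -- unreachable: every x in add_blocks is in blocks
        []

def string_builder_helper (bin_str : String) (blocks : List String) : List String :=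
  sbhGoA (blocks.length + 1) bin_str blocks

-- ===== PORT B =====
-- B's add_blocks (same guard code as in Source B)
def sbhAddBlocksB (s : String) (bs : List String) : List String :=
  (if "11111" ∈ bs ∧ PySem.Str.pyGet? s (-1) = some '0' then ["11111"] else []) ++
  (if "111" ∈ bs ∧ PySem.Str.pyGet? s (-1) = some '0' then ["111"] else []) ++
  (if "000" ∈ bs ∧ PySem.Str.pyGet? s (-1) = some '1' then ["000"] else []) ++
  (if "1" ∈ bs ∧ ¬(PySem.Str.pyGet? s (-1) = some '1' ∧ PySem.Str.pyGet? s (-2) = some '1') then ["1"] else []) ++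
  (if "0" ∈ bs ∧ ¬(PySem.Str.pyGet? s (-1) = some '0' ∧ PySem.Str.pyGet? s (-2) = some '0') then ["0"] else [])

-- Source B's children of a popped state, in push-reversed = pop order (head of list = top of stack)
def sbhChildren (s : String) (bs : List String) : List (String × List String) :=
  (sbhAddBlocksB s bs).filterMap (fun x =>
    match PySem.List.index? bs x with
    | some i => some (s ++ x, bs.take i ++ bs.drop (i + 1))
    | none => none)  -- unreachable: every x in add_blocks is in bs

-- fuel bound for Source B's while loop: 6^(remaining-blocks length) per stack state
-- (≤ 5 children per pop, each one block shorter, so this strictly drops at every pop)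
def sbhMeasure (st : List (String × List String)) : Nat :=
  (st.map (fun p => 6 ^ p.2.length)).sum

-- Source B's 'while stack' loop: pop, emit leaf or push children (fuel-0 branch unreachable
-- at the entry point below)
def sbhDfs : Nat → List (String × List String) → List String → List String
  | 0, _, results => results
  | _ + 1, [], results => results
  | fuel + 1, (s, bs) :: rest, results =>
    if bs = [] then sbhDfs fuel rest (results ++ [s])
    else sbhDfs fuel (sbhChildren s bs ++ rest) results

def string_builder_helper_alt (bin_str : String) (blocks : List String) : List String :=
  sbhDfs (sbhMeasure [(bin_str, blocks)]) [(bin_str, blocks)] []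

-- ===== PRECONDITION & SPEC =====
-- Pre_ excludes exactly the inputs where Python A raises IndexError reading bin_str[-1] or
-- bin_str[-2] (bin_str too short for the guards that fire); B raises there too.
def Pre_string_builder_helper (bin_str : String) (blocks : List String) : Prop :=
  blocks = [] ∨ 2 ≤ bin_str.toList.length ∨
  (bin_str.toList.length = 1 ∧
    ¬("1" ∈ blocks ∧ bin_str.toList.getLast? = some '1') ∧
    ¬("0" ∈ blocks ∧ bin_str.toList.getLast? = some '0')) ∨
  (bin_str.toList.length = 0 ∧ "11111" ∉ blocks ∧ "111" ∉ blocks ∧ "000" ∉ blocks ∧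
    "1" ∉ blocks ∧ "0" ∉ blocks)
instance (bin_str : String) (blocks : List String) : Decidable (Pre_string_builder_helper bin_str blocks) := by
  unfold Pre_string_builder_helper; infer_instance

def pvWitness_string_builder_helper : String × List String := ("", [])

def Spec_string_builder_helper (bin_str : String) (blocks : List String) (out : List String) : Prop := out = string_builder_helper_alt bin_str blocks
instance (bin_str : String) (blocks : List String) (out : List String) : Decidable (Spec_string_builder_helper bin_str blocks out) := by unfold Spec_string_builder_helper; infer_instance

-- ===== CLAIM (what is proved, stated in full; the proofs are below) =====
def Claim_equal_string_builder_helper : Prop := ∀ (bin_str : String) (blocks : List String), Dom_string_builder_helper bin_str blocks → Pre_string_builder_helper bin_str blocks → Spec_string_builder_helper bin_str blocks (string_builder_helper bin_str blocks)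

-- ===== LEMMAS AND PROOFS =====

-- one while-loop iteration on a non-leaf state drops sbhMeasure by at least 1
theorem sbhChildren_measure (s : String) (bs : List String) (h : bs ≠ []) :
    sbhMeasure (sbhChildren s bs) < 6 ^ bs.length := by
  have hn : 1 ≤ bs.length := by cases bs <;> simp_all
  have hlen : (sbhChildren s bs).length ≤ 5 := by
    refine le_trans (List.length_filterMap_le _ _) ?_
    unfold sbhAddBlocksB; split_ifs <;> simp
  have hval : ∀ p ∈ sbhChildren s bs, 6 ^ p.2.length = 6 ^ (bs.length - 1) := by
    intro p hp
    simp only [sbhChildren, List.mem_filterMap] at hp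
    obtain ⟨x, _, hx⟩ := hp
    rcases hidx : PySem.List.index? bs x with _ | i <;> rw [hidx] at hx
    · simp at hx
    · have hi := (PySem.List.getElem_of_index?_eq_some hidx).1
      simp only [Option.some.injEq] at hx
      subst hx
      simp only [List.length_append, List.length_take, List.length_drop]
      congr 1
      omega
  calc sbhMeasure (sbhChildren s bs)
      = ((sbhChildren s bs).map (fun p => 6 ^ p.2.length)).sum := rfl
    _ = ((sbhChildren s bs).map (fun _ => 6 ^ (bs.length - 1))).sum := by
        rw [List.map_congr_left hval]
    _ = (sbhChildren s bs).length * 6 ^ (bs.length - 1) := by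
        rw [List.map_const']; simp [List.sum_replicate, smul_eq_mul]
    _ ≤ 5 * 6 ^ (bs.length - 1) := Nat.mul_le_mul_right _ hlen
    _ < 6 * 6 ^ (bs.length - 1) := by
        have : 0 < 6 ^ (bs.length - 1) := Nat.pow_pos (by norm_num)
        omega
    _ = 6 ^ (bs.length - 1 + 1) := by ring
    _ = 6 ^ bs.length := by congr 1; omega

-- the fuel is a pure guard: any two sufficient fuels give the same value
theorem sbhGoA_fuel (f : Nat) : ∀ (g : Nat) (s : String) (bs : List String),
    bs.length < f → bs.length < g → sbhGoA f s bs = sbhGoA g s bs := by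
  induction f with
  | zero => intro g s bs hf _; omega
  | succ f ih =>
    intro g s bs hf hg
    rcases g with _ | g
    · omega
    rw [sbhGoA, sbhGoA]
    by_cases hbs : bs = []
    · rw [if_pos hbs, if_pos hbs]
    rw [if_neg hbs, if_neg hbs]
    have hn : 1 ≤ bs.length := by cases bs <;> simp_all
    congr 1
    funext strings x
    rcases hidx : PySem.List.index? bs x with _ | i
    · rfl
    · have hi := (PySem.List.getElem_of_index?_eq_some hidx).1
      have hlen : (bs.take i ++ bs.drop (i + 1)).length = bs.length - 1 := by
        simp only [List.length_append, List.length_take, List.length_drop]; omega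
      show strings ++ sbhGoA f (s ++ x) (bs.take i ++ bs.drop (i + 1)) =
        strings ++ sbhGoA g (s ++ x) (bs.take i ++ bs.drop (i + 1))
      rw [ih g (s ++ x) (bs.take i ++ bs.drop (i + 1)) (by omega) (by omega)]

-- A's result for a state, with its canonical sufficient fuel
def sbhA (p : String × List String) : List String := sbhGoA (p.2.length + 1) p.1 p.2

-- one unfolding of A's recursion, loop written as a flatten of per-block results
theorem sbhA_unfold (s : String) (bs : List String) (hbs : bs ≠ []) :
    sbhA (s, bs) =
      ((sbhAddBlocksA s bs).map (fun x =>
        match PySem.List.index? bs x with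
        | some i => sbhA (s ++ x, bs.take i ++ bs.drop (i + 1))
        | none => [])).flatten := by
  have hn : 1 ≤ bs.length := by cases bs <;> simp_all
  show sbhGoA (bs.length + 1) s bs = _
  rw [sbhGoA, if_neg hbs]
  have hfold : (fun (strings : List String) (x : String) =>
      match PySem.List.index? bs x with
      | some i => strings ++ sbhGoA bs.length (s ++ x) (bs.take i ++ bs.drop (i + 1))
      | none => strings)
      = fun strings x => strings ++ (match PySem.List.index? bs x with
        | some i => sbhGoA bs.length (s ++ x) (bs.take i ++ bs.drop (i + 1))
        | none => []) := by
    funext strings x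
    rcases PySem.List.index? bs x with _ | i
    · simp
    · rfl
  rw [hfold, PySem.List.foldl_append_eq_flatMap, List.nil_append, List.flatMap_def]
  congr 1
  apply List.map_congr_left
  intro x _
  rcases hidx : PySem.List.index? bs x with _ | i
  · rfl
  · have hi := (PySem.List.getElem_of_index?_eq_some hidx).1
    have hlen : (bs.take i ++ bs.drop (i + 1)).length = bs.length - 1 := by
      simp only [List.length_append, List.length_take, List.length_drop]; omega
    show sbhGoA bs.length (s ++ x) _ = sbhA _
    unfold sbhA
    exact sbhGoA_fuel bs.length _ (s ++ x) _ (by omega) (by simp [hlen])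

-- (s, bs)'s children on the stack expand to exactly A's result for (s, bs)
theorem sbhChildren_flatten (s : String) (bs : List String) (hbs : bs ≠ []) :
    ((sbhChildren s bs).map sbhA).flatten = sbhA (s, bs) := by
  rw [sbhA_unfold s bs hbs,
    show sbhAddBlocksA s bs = sbhAddBlocksB s bs from rfl]
  unfold sbhChildren
  generalize sbhAddBlocksB s bs = ab
  induction ab with
  | nil => simp
  | cons y ys ihy =>
    rcases h2 : PySem.List.index? bs y with _ | i <;>
      simp only [List.filterMap_cons, h2, List.map_cons, List.flatten_cons, ihy,
        List.nil_append]

-- with sufficient fuel, the DFS emits, in order, A's result for every state on the stack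
theorem sbhDfs_eq (fuel : Nat) : ∀ (st : List (String × List String)) (res : List String),
    sbhMeasure st ≤ fuel → sbhDfs fuel st res = res ++ (st.map sbhA).flatten := by
  induction fuel with
  | zero =>
    intro st res hm
    rcases st with _ | ⟨⟨s, bs⟩, rest⟩
    · simp [sbhDfs]
    · exfalso
      have : 0 < 6 ^ bs.length := Nat.pow_pos (by norm_num)
      simp only [sbhMeasure, List.map_cons, List.sum_cons, Nat.le_zero] at hm
      omega
  | succ fuel ih =>
    intro st res hm
    rcases st with _ | ⟨⟨s, bs⟩, rest⟩
    · simp [sbhDfs]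
    simp only [sbhMeasure, List.map_cons, List.sum_cons] at hm
    by_cases hbs : bs = []
    · subst hbs
      have hr : sbhMeasure rest ≤ fuel := by
        simp only [sbhMeasure]
        simp at hm
        omega
      rw [sbhDfs, if_pos rfl, ih rest (res ++ [s]) hr]
      have : sbhA (s, []) = [s] := rfl
      simp [this, List.append_assoc]
    · rw [sbhDfs, if_neg hbs]
      have hc := sbhChildren_measure s bs hbs
      have hm2 : sbhMeasure (sbhChildren s bs ++ rest) ≤ fuel := by
        simp only [sbhMeasure, List.map_append, List.sum_append] at *
        omega
      rw [ih _ res hm2]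
      simp only [List.map_append, List.flatten_append, List.map_cons, List.flatten_cons]
      congr 1
      rw [sbhChildren_flatten s bs hbs]

-- ===== VERDICT (by name: the statement is the Claim_ definition above) =====
theorem string_builder_helper_spec : Claim_equal_string_builder_helper := by
  intro bin_str blocks _ _
  unfold Spec_string_builder_helper string_builder_helper_alt string_builder_helper
  rw [sbhDfs_eq _ _ _ (le_refl _)]
  show sbhA (bin_str, blocks) = _
  simp
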